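-- pv_equiv track=rewrite | github.com/Maricruz-GA/Variables-para-el-MIE | scripts-r/R_Julian/r_path_manifest_v0_6.py | prune_redundant_bases
-- ===== SOURCE A (Python) =====
-- from typing import Dict, List, Optional, Tuple
--
-- def canonical_base(base: str) -> str:
--     b = base.rstrip('/')
--     if b.startswith('./'):
--         b = b[2:]
--     return b
--
-- def unique_preserve(values: List[str]) -> List[str]:
--     out = []
--     seen = set()
--     for v in values:
--         key = canonical_base(v)
--         if key not in seen:
--             seen.add(key)
--             out.append(canonical_base(v))
--     return out
--
-- def prune_redundant_bases(values: List[str]) -> List[str]: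
--     vals = unique_preserve(values)
--     result = []
--     for v in vals:
--         redundant = False
--         for other in vals:
--             if v == other:
--                 continue
--             if other.startswith(v + '/'):
--                 redundant = True
--                 break
--         if not redundant:
--             result.append(v)
--     return result
-- ===== SOURCE B (Python) =====
-- def canonical_base(base):
--     b = base.rstrip('/')
--     if b.startswith('./'):
--         b = b[2:]
--     return b
--
--
-- def _ancestors_of(o):
--     return [o[:i] for i, ch in enumerate(o) if ch == '/']
--
--
-- def prune_redundant_bases(values):
--     seen = set()
--     vals = []
--     for v in values:
--         c = canonical_base(v)
--         if c not in seen: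
--             seen.add(c)
--             vals.append(c)
--     ancestors = set()
--     for o in vals:
--         ancestors.update(_ancestors_of(o))
--     return [v for v in vals if v not in ancestors]
-- ===== Notes on version B (the rewrite author's own statement) =====
-- stated objective: faster
-- what changed: Replaces the quadratic all-pairs startswith scan with one pass that indexes every '/'-delimited ancestor prefix of every base in a hash set, so each base is pruned by a single set lookup.
import Mathlib
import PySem

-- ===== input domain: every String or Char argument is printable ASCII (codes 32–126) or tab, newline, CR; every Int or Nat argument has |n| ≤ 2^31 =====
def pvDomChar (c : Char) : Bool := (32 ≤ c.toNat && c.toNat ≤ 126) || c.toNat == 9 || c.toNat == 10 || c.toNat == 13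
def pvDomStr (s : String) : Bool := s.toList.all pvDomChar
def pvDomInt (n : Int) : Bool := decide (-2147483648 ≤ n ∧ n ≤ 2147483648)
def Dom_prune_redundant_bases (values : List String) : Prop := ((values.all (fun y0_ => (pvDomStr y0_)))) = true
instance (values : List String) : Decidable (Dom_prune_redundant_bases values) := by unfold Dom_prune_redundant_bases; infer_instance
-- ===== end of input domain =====

-- B indexes every '/'-delimited ancestor prefix of every base in a set once, replacing A's
-- all-pairs startswith scan by one set lookup per base (asymptotically faster).

-- ===== PORT A =====
-- canonical_base (shared helper of both Pythons, ported once):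
-- base.rstrip('/') has no PySem primitive for a char argument; ported by hand as
-- reverse/dropWhile '/'/reverse, which is exactly what rstrip('/') removes.
def pvCanonicalBase (base : String) : String :=
  let b := String.ofList (base.toList.reverse.dropWhile (· == '/')).reverse
  if PySem.Chars.startswith b.toList ['.', '/'] then
    String.ofList (PySem.List.slice b.toList (some 2) none)   -- b[2:]
  else b

-- unique_preserve: one loop carrying (out, seen)
def pvUniquePreserve (values : List String) : List String :=
  (values.foldl (fun (st : List String × PySem.Set String) v =>
      let key := pvCanonicalBase v
      if !(PySem.Set.contains st.2 key) then
        (st.1 ++ [pvCanonicalBase v], PySem.Set.add st.2 key)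
      else st) ([], PySem.Set.empty)).1

def prune_redundant_bases (values : List String) : List String :=
  let vals := pvUniquePreserve values
  vals.foldl (fun result v =>
    -- inner 'for other in vals: … break' = List.any; 'continue' on v == other stays a branch
    let redundant := vals.any (fun other =>
      if v == other then false
      else PySem.Chars.startswith other.toList (v.toList ++ ['/']))  -- other.startswith(v + '/')
    if !redundant then result ++ [v] else result) []

-- ===== PORT B =====
-- _ancestors_of(o) = [o[:i] for i, ch in enumerate(o) if ch == '/']
def pvAncestorsOf (o : String) : List String :=
  ((PySem.List.enumerate o.toList).filter (fun p => p.2 == '/')).map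
    (fun p => String.ofList (PySem.List.slice o.toList none (some p.1)))

def prune_redundant_bases_alt (values : List String) : List String :=
  let vals := (values.foldl (fun (st : List String × PySem.Set String) v =>
      let c := pvCanonicalBase v
      if !(PySem.Set.contains st.2 c) then (st.1 ++ [c], PySem.Set.add st.2 c)
      else st) ([], PySem.Set.empty)).1
  let ancestors := vals.foldl (fun s o => PySem.Set.update s (pvAncestorsOf o)) PySem.Set.empty
  vals.filter (fun v => !(PySem.Set.contains ancestors v))

-- ===== PRECONDITION & SPEC =====
def Spec_prune_redundant_bases (values : List String) (out : List String) : Prop := out = prune_redundant_bases_alt values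
instance (values : List String) (out : List String) : Decidable (Spec_prune_redundant_bases values out) := by unfold Spec_prune_redundant_bases; infer_instance

-- ===== CLAIM (what is proved, stated in full; the proofs are below) =====
def Claim_equal_prune_redundant_bases : Prop := ∀ (values : List String), Dom_prune_redundant_bases values → Spec_prune_redundant_bases values (prune_redundant_bases values)

-- ===== LEMMAS AND PROOFS =====

lemma prefix_slash_iff (w cs : List Char) :
    (w ++ ['/']) <+: cs ↔ ∃ k, ∃ h : k < cs.length, cs[k] = '/' ∧ w = cs.take k := by
  constructor
  · intro hp
    have hlen : w.length + 1 ≤ cs.length := by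
      have := hp.length_le; simpa using this
    have hk : w.length < cs.length := by omega
    refine ⟨w.length, hk, ?_, ?_⟩
    · have htake := (List.prefix_iff_eq_take.mp hp)
      rw [List.length_append] at htake
      simp at htake
      rw [List.take_add_one] at htake
      have hget : cs[w.length]? = some cs[w.length] := List.getElem?_eq_getElem hk
      rw [hget] at htake
      have hlen2 : (cs.take w.length).length = w.length := by simp; omega
      have := List.append_inj' htake (by simp)
      simpa using this.2.symm
    · have htake := (List.prefix_iff_eq_take.mp hp)
      rw [List.length_append] at htake
      simp at htake
      rw [List.take_add_one] at htake
      have hget : cs[w.length]? = some cs[w.length] := List.getElem?_eq_getElem hk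
      rw [hget] at htake
      have := List.append_inj' htake (by simp)
      exact this.1
  · rintro ⟨k, hk, hsl, rfl⟩
    have : cs.take k ++ ['/'] = cs.take (k + 1) := by
      rw [List.take_add_one, List.getElem?_eq_getElem hk, hsl]; rfl
    rw [this]
    exact List.take_prefix _ _

lemma mem_ancestorsOf (v o : String) :
    v ∈ pvAncestorsOf o ↔ (v.toList ++ ['/']) <+: o.toList := by
  rw [prefix_slash_iff]
  unfold pvAncestorsOf
  simp only [List.mem_map, List.mem_filter, PySem.List.mem_enumerate_iff]
  constructor
  · rintro ⟨p, ⟨⟨k, hk, rfl⟩, hsl⟩, rfl⟩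
    simp only [beq_iff_eq] at hsl
    refine ⟨k, hk, hsl, ?_⟩
    rw [show ((0 : Int) + k) = ((k : Nat) : Int) by omega, PySem.List.slice_to_natCast]
    simp
  · rintro ⟨k, hk, hsl, hv⟩
    refine ⟨((0 : Int) + k, o.toList[k]), ⟨⟨k, hk, rfl⟩, by simpa using hsl⟩, ?_⟩
    rw [show ((0 : Int) + k) = ((k : Nat) : Int) by omega, PySem.List.slice_to_natCast]
    rw [← hv]
    simp

lemma mem_ancestors_foldl (vals : List String) (s0 : PySem.Set String) (v : String) :
    v ∈ vals.foldl (fun s o => PySem.Set.update s (pvAncestorsOf o)) s0 ↔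
      v ∈ s0 ∨ ∃ o ∈ vals, v ∈ pvAncestorsOf o := by
  induction vals generalizing s0 with
  | nil => simp
  | cons a l ih =>
    simp only [List.foldl_cons, ih, PySem.Set.mem_update, List.mem_cons]
    constructor
    · rintro (⟨h | h⟩ | ⟨o, ho, hv⟩)
      · exact Or.inl h
      · exact Or.inr ⟨a, Or.inl rfl, h⟩
      · exact Or.inr ⟨o, Or.inr ho, hv⟩
    · rintro (h | ⟨o, (rfl | ho), hv⟩)
      · exact Or.inl (Or.inl h)
      · exact Or.inl (Or.inr hv)
      · exact Or.inr ⟨o, ho, hv⟩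

lemma pred_key (vals : List String) (v : String) :
    (vals.any (fun other =>
      if v == other then false
      else PySem.Chars.startswith other.toList (v.toList ++ ['/'])))
    = PySem.Set.contains
        (vals.foldl (fun s o => PySem.Set.update s (pvAncestorsOf o)) PySem.Set.empty) v := by
  rw [Bool.eq_iff_iff, List.any_eq_true, PySem.Set.contains_iff, mem_ancestors_foldl]
  simp only [PySem.Set.empty, List.not_mem_nil, false_or]
  constructor
  · rintro ⟨o, ho, hpred⟩
    by_cases hvo : v == o
    · simp [hvo] at hpred
    · simp only [hvo, Bool.false_eq_true, if_false] at hpred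
      exact ⟨o, ho, (mem_ancestorsOf v o).mpr ((PySem.Chars.startswith_iff _ _).mp hpred)⟩
  · rintro ⟨o, ho, hv⟩
    have hp := (mem_ancestorsOf v o).mp hv
    refine ⟨o, ho, ?_⟩
    have hvo : ¬ (v == o) = true := by
      intro h
      have : v = o := by simpa using h
      subst this
      have := hp.length_le
      simp at this
    simp only [hvo]
    simp only [Bool.false_eq_true, if_false] at *
    exact (PySem.Chars.startswith_iff _ _).mpr hp

-- ===== VERDICT (by name: the statement is the Claim_ definition above) =====
theorem prune_redundant_bases_spec : Claim_equal_prune_redundant_bases := by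
  intro values _
  unfold Spec_prune_redundant_bases
  unfold prune_redundant_bases prune_redundant_bases_alt
  have hdedup : (values.foldl (fun (st : List String × PySem.Set String) v =>
      let c := pvCanonicalBase v
      if !(PySem.Set.contains st.2 c) then (st.1 ++ [c], PySem.Set.add st.2 c)
      else st) ([], PySem.Set.empty)).1 = pvUniquePreserve values := rfl
  rw [hdedup]
  generalize pvUniquePreserve values = vals
  rw [PySem.List.foldl_append_if
    (fun v => !(vals.any (fun other =>
      if v == other then false
      else PySem.Chars.startswith other.toList (v.toList ++ ['/'])))) (fun v => v) vals []]
  simp only [List.nil_append, List.map_id']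
  apply List.filter_congr
  intro v _
  rw [pred_key]
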